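-- pv_equiv track=rewrite | github.com/Nama21yo/Natnael_CP | cses.py | solve
-- ===== SOURCE A (Python) =====
-- def solve(arr, N):
--     # Dictionary to store the frequency of prefix sums % N
--     remainders_cnt = {0: 1}
--     remainder = 0
--     cnt = 0
--
--     # Iterate over all the indices and add the count of
--     # subarrays with sum divisible by N
--     for i in range(len(arr)):
--         # Since arr[i] can be negative, we add N to the
--         # remainder to avoid negative remainders
--         remainder = ((remainder + arr[i]) % N + N) % N
--         cnt += remainders_cnt.get(remainder, 0)
--         remainders_cnt[remainder] = remainders_cnt.get(remainder, 0) + 1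
--
--     return cnt
-- ===== SOURCE B (Python) =====
-- def solve(arr, N):
--     # Build the list of prefix remainders (seeded with the leading 0).
--     prefs = [0]
--     r = 0
--     for x in arr:
--         r = ((r + x) % N + N) % N
--         prefs.append(r)
--     # Sort, then scan runs of equal remainders: a run of length c
--     # contributes c*(c-1)//2 subarrays.
--     prefs.sort()
--     total = 0
--     prev = None
--     run = 0
--     for v in prefs:
--         if prev is not None and v == prev:
--             run += 1
--         else:
--             total += run * (run - 1) // 2
--             prev = v
--             run = 1
--     return total + run * (run - 1) // 2
-- ===== Notes on version B (the rewrite author's own statement) =====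
-- stated objective: alternative
-- what changed: Replaces A's hash-map of prefix remainders with incremental counting by a sort-based method: collect all prefix remainders into a list, sort it, and scan runs of equal values, adding c*(c-1)//2 per run length c; no dictionary at all.
import Mathlib
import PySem

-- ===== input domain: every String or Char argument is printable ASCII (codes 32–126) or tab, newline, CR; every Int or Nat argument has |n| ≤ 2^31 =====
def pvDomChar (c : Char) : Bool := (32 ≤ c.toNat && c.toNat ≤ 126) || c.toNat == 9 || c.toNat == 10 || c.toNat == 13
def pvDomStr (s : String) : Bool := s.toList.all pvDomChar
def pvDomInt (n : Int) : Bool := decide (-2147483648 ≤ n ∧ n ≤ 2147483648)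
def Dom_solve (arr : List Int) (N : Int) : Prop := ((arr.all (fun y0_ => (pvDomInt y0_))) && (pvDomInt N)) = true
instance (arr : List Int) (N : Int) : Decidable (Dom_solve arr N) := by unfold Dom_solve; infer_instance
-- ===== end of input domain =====

-- B replaces A's frequency dictionary with a sort-then-run-scan: collect all prefix
-- remainders, sort them, and sum c*(c-1)//2 over run lengths; same results, O(n log n).


-- ===== PORT A =====
-- A's loop 'for i in range(len(arr))' uses i only as arr[i]; ported as a fold over the
-- elements (exact: the range covers exactly the indices of arr).
def solve (arr : List Int) (N : Int) : Int :=
  (arr.foldl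
    (fun (st : PySem.Dict Int Int × Int × Int) x =>
      let r := PySem.Int.mod (PySem.Int.mod (st.2.1 + x) N + N) N
      let c := st.1.getD r 0
      (st.1.insert r (st.1.getD r 0 + 1), r, st.2.2 + c))
    (PySem.Dict.ofList [((0 : Int), (1 : Int))], 0, 0)).2.2

-- ===== PORT B =====
-- prefs.sort() (in place, default order) = PySem.List.sorted with the identity key.
def solve_alt (arr : List Int) (N : Int) : Int :=
  let pr := arr.foldl
    (fun (st : List Int × Int) x =>
      let r := PySem.Int.mod (PySem.Int.mod (st.2 + x) N + N) N
      (st.1 ++ [r], r))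
    ([0], 0)
  let s := PySem.List.sorted pr.1 (fun v => v) false
  let st := s.foldl
    (fun (st : Option Int × Int × Int) v =>
      if st.1 ≠ none ∧ some v = st.1 then (st.1, st.2.1 + 1, st.2.2)
      else (some v, 1, st.2.2 + PySem.Int.floordiv (st.2.1 * (st.2.1 - 1)) 2))
    (none, 0, 0)
  st.2.2 + PySem.Int.floordiv (st.2.1 * (st.2.1 - 1)) 2

-- ===== PRECONDITION & SPEC =====
-- Pre_ excludes only N = 0 with a nonempty arr: there '% N' raises ZeroDivisionError in
-- both A and B (on empty arr neither ever divides and both return 0).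
def Pre_solve (arr : List Int) (N : Int) : Prop := N ≠ 0 ∨ arr = []
instance (arr : List Int) (N : Int) : Decidable (Pre_solve arr N) := by unfold Pre_solve; infer_instance
def pvWitness_solve : List Int × Int := ([1, 2, 3, -3], 3)
def Spec_solve (arr : List Int) (N : Int) (out : Int) : Prop := out = solve_alt arr N
instance (arr : List Int) (N : Int) (out : Int) : Decidable (Spec_solve arr N out) := by unfold Spec_solve; infer_instance

-- ===== CLAIM (what is proved, stated in full; the proofs are below) =====
def Claim_equal_solve : Prop := ∀ (arr : List Int) (N : Int), Dom_solve arr N → Pre_solve arr N → Spec_solve arr N (solve arr N)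

-- ===== LEMMAS AND PROOFS =====

-- c choose 2, as B computes it.
def pvC2 (k : Int) : Int := PySem.Int.floordiv (k * (k - 1)) 2

-- Number of (unordered) equal pairs in a list.
def pvPairs : List Int → Int
  | [] => 0
  | x :: t => (t.count x : Int) + pvPairs t

lemma pvC2_step (c : Int) : pvC2 (c + 1) = pvC2 c + c := by
  unfold pvC2
  have h : (c + 1) * (c + 1 - 1) = (c + 1) * c := by ring
  rw [h]
  obtain ⟨k, hk⟩ : Even (c * (c - 1)) := by
    have := Int.even_mul_succ_self (c - 1)
    simpa [mul_comm] using this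
  have h1 : PySem.Int.floordiv (c * (c - 1)) 2 = k := by
    rw [PySem.Int.floordiv_eq_iff_of_pos (by norm_num)]
    constructor <;> nlinarith
  have h2 : PySem.Int.floordiv ((c + 1) * c) 2 = k + c := by
    rw [PySem.Int.floordiv_eq_iff_of_pos (by norm_num)]
    constructor <;> nlinarith
  omega

lemma pvPairs_append (L : List Int) (x : Int) :
    pvPairs (L ++ [x]) = pvPairs L + (L.count x : Int) := by
  induction L with
  | nil => simp [pvPairs]
  | cons a t ih =>
    simp only [List.cons_append, pvPairs, ih, List.count_append, List.count_cons,
      List.count_nil]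
    by_cases h : a = x
    · subst h; simp; ring
    · simp [h, Ne.symm h]; ring

lemma pvPairs_perm {l1 l2 : List Int} (h : l1.Perm l2) : pvPairs l1 = pvPairs l2 := by
  induction h with
  | nil => rfl
  | cons x h ih => simp [pvPairs, ih, h.count_eq]
  | swap x y t =>
    simp only [pvPairs, List.count_cons]
    by_cases hxy : x = y
    · subst hxy; ring
    · simp [hxy, Ne.symm hxy]; ring
  | trans _ _ ih1 ih2 => exact ih1.trans ih2

-- A's loop invariant: running A's fold from a dict that holds the counts of the prefix
-- list L with cnt = pvPairs L, the final cnt is pvPairs of the full prefix list that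
-- B's first pass builds from (L, r).
lemma pvA_inv (N : Int) (arr : List Int) :
    ∀ (d : PySem.Dict Int Int) (r cnt : Int) (L : List Int),
    (∀ k, d.getD k 0 = (L.count k : Int)) → cnt = pvPairs L →
    (arr.foldl
      (fun (st : PySem.Dict Int Int × Int × Int) x =>
        let r := PySem.Int.mod (PySem.Int.mod (st.2.1 + x) N + N) N
        let c := st.1.getD r 0
        (st.1.insert r (st.1.getD r 0 + 1), r, st.2.2 + c)) (d, r, cnt)).2.2
    = pvPairs ((arr.foldl
      (fun (st : List Int × Int) x =>
        let r := PySem.Int.mod (PySem.Int.mod (st.2 + x) N + N) N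
        (st.1 ++ [r], r)) (L, r)).1) := by
  induction arr with
  | nil =>
    intro d r cnt L _ hcnt
    simpa using hcnt
  | cons x t ih =>
    intro d r cnt L hd hcnt
    simp only [List.foldl_cons]
    apply ih
    · intro k
      by_cases hk : k = PySem.Int.mod (PySem.Int.mod (r + x) N + N) N
      · subst hk
        simp [PySem.Dict.getD_insert_self, hd, List.count_append]
      · simp [PySem.Dict.getD_insert_of_ne _ _ _ hk, hd, List.count_append, Ne.symm hk]
    · rw [hcnt, hd, pvPairs_append]

-- B's run-scan invariant: having consumed a sorted prefix L whose maximum p closes a run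
-- of length run (= count of p in L) with tot + pvC2 run = pvPairs L, finishing the fold
-- over the sorted remainder t yields pvPairs (L ++ t).
lemma pvRun_inv (t : List Int) :
    ∀ (p run tot : Int) (L : List Int),
    (L ++ t).Pairwise (· ≤ ·) → (∀ y ∈ L, y ≤ p) → p ∈ L →
    run = (L.count p : Int) → tot + pvC2 run = pvPairs L →
    (let st := t.foldl
      (fun (st : Option Int × Int × Int) v =>
        if st.1 ≠ none ∧ some v = st.1 then (st.1, st.2.1 + 1, st.2.2)
        else (some v, 1, st.2.2 + PySem.Int.floordiv (st.2.1 * (st.2.1 - 1)) 2))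
      (some p, run, tot)
     st.2.2 + PySem.Int.floordiv (st.2.1 * (st.2.1 - 1)) 2) = pvPairs (L ++ t) := by
  induction t with
  | nil =>
    intro p run tot L _ _ _ _ hinv
    simpa [pvC2] using hinv
  | cons v t' ih =>
    intro p run tot L hpw hle hmem hrun hinv
    have hassoc : L ++ v :: t' = (L ++ [v]) ++ t' := by simp
    have hpv : p ≤ v := by
      rcases List.pairwise_append.mp hpw with ⟨_, _, hcross⟩
      exact hcross p hmem v (List.mem_cons_self)
    by_cases hvp : v = p
    · subst hvp
      rw [List.foldl_cons,
        if_pos (⟨by simp, rfl⟩ :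
          (some v : Option Int) ≠ none ∧ (some v : Option Int) = some v)]
      rw [hassoc]
      apply ih
      · rw [← hassoc]; exact hpw
      · intro y hy
        rcases List.mem_append.mp hy with hy | hy
        · exact hle y hy
        · simp at hy; omega
      · simp
      · simp [List.count_append, hrun]
      · rw [pvC2_step, ← add_assoc, hinv, pvPairs_append, hrun]
    · have hcond : ¬ ((some p : Option Int) ≠ none ∧ (some v : Option Int) = some p) := by
        simp [hvp]
      simp only [List.foldl_cons, if_neg hcond]
      rw [hassoc]
      have hvL : v ∉ L := by
        intro hvL
        have := hle v hvL
        omega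
      apply ih
      · rw [← hassoc]; exact hpw
      · intro y hy
        rcases List.mem_append.mp hy with hy | hy
        · exact le_trans (hle y hy) hpv
        · simp at hy; omega
      · simp
      · simp [List.count_append, List.count_eq_zero.mpr hvL]
      · have hC1 : pvC2 1 = 0 := by decide
        rw [hC1, add_zero, pvPairs_append, List.count_eq_zero.mpr hvL]
        show tot + pvC2 run = pvPairs L + ((0 : Nat) : Int)
        simpa using hinv

-- B's first pass always returns a nonempty list (it starts from a nonempty seed).
lemma pvPref_ne_nil (N : Int) (arr : List Int) :
    ∀ (L : List Int) (r : Int), L ≠ [] →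
    (arr.foldl
      (fun (st : List Int × Int) x =>
        let r := PySem.Int.mod (PySem.Int.mod (st.2 + x) N + N) N
        (st.1 ++ [r], r)) (L, r)).1 ≠ [] := by
  induction arr with
  | nil => intro L r h; simpa using h
  | cons x t ih =>
    intro L r h
    simp only [List.foldl_cons]
    exact ih _ _ (by simp)

-- The run-scan part of B, applied to sorting any nonempty list, counts its equal pairs.
lemma pvScan (l : List Int) (hne : l ≠ []) :
    (let st := (PySem.List.sorted l (fun v => v) false).foldl
        (fun (st : Option Int × Int × Int) v =>
          if st.1 ≠ none ∧ some v = st.1 then (st.1, st.2.1 + 1, st.2.2)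
          else (some v, 1, st.2.2 + PySem.Int.floordiv (st.2.1 * (st.2.1 - 1)) 2))
        (none, 0, 0)
     st.2.2 + PySem.Int.floordiv (st.2.1 * (st.2.1 - 1)) 2) = pvPairs l := by
  show ((PySem.List.sorted l (fun v => v) false).foldl
        (fun (st : Option Int × Int × Int) v =>
          if st.1 ≠ none ∧ some v = st.1 then (st.1, st.2.1 + 1, st.2.2)
          else (some v, 1, st.2.2 + PySem.Int.floordiv (st.2.1 * (st.2.1 - 1)) 2))
        (none, 0, 0)).2.2 + _ = pvPairs l
  have hperm : (PySem.List.sorted l (fun v => v) false).Perm l :=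
    PySem.List.sorted_perm l (fun v => v) false
  have hpw : (PySem.List.sorted l (fun v => v) false).Pairwise (· ≤ ·) := by
    have := PySem.List.sorted_pairwise l (fun v => v)
    simpa using this
  have hsne : PySem.List.sorted l (fun v => v) false ≠ [] := by
    intro h
    rw [h] at hperm
    exact hne hperm.symm.eq_nil
  obtain ⟨v, s', hs⟩ := List.exists_cons_of_ne_nil hsne
  rw [hs]
  simp only [List.foldl_cons]
  have hfirst : ¬ ((none : Option Int) ≠ none ∧ (some v : Option Int) = none) := by simp
  rw [if_neg hfirst]
  have hC0 : PySem.Int.floordiv ((0 : Int) * (0 - 1)) 2 = 0 := by decide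
  rw [hC0, add_zero]
  have hrun := pvRun_inv s' v 1 0 [v]
    (by rw [show ([v] : List Int) ++ s' = v :: s' from rfl, ← hs]; exact hpw)
    (by intro y hy; simp at hy; omega) (by simp) (by simp)
    (by show (0 : Int) + pvC2 1 = pvPairs [v]; simp [pvPairs]; decide)
  simp only at hrun
  rw [hrun]
  have h1 : ([v] : List Int) ++ s' = v :: s' := rfl
  rw [h1, ← hs]
  exact pvPairs_perm hperm

-- B's value is pvPairs of its (unsorted) prefix list.
lemma pvB_eq_pairs (arr : List Int) (N : Int) :
    solve_alt arr N
    = pvPairs ((arr.foldl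
        (fun (st : List Int × Int) x =>
          let r := PySem.Int.mod (PySem.Int.mod (st.2 + x) N + N) N
          (st.1 ++ [r], r)) (([0] : List Int), 0)).1) :=
  pvScan _ (pvPref_ne_nil N arr [0] 0 (by simp))

-- ===== VERDICT (by name: the statement is the Claim_ definition above) =====
theorem solve_spec : Claim_equal_solve := by
  intro arr N _ _
  unfold Spec_solve
  rw [pvB_eq_pairs]
  unfold solve
  apply pvA_inv
  · intro k
    by_cases hk : k = 0
    · subst hk; rfl
    · show (PySem.Dict.ofList [((0:Int),(1:Int))]).getD k 0 = _
      rw [PySem.Dict.getD_eq_get?_getD]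
      have hget : (PySem.Dict.ofList [((0:Int),(1:Int))]).get? k = none := by
        show (PySem.Dict.mk [((0:Int),(1:Int))]).get? k = none
        rw [PySem.Dict.get?_mk_cons]
        rw [if_neg (by simp [Ne.symm hk])]
        rfl
      rw [hget]
      simp [Ne.symm hk]
  · rfl
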